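-- pv_equiv track=rewrite | github.com/jaeml06/Codeing-Test | 프로그래머스/2/131704. 택배상자/택배상자.py | solution
-- ===== SOURCE A (Python) =====
-- def solution(order):
--     answer = 0
--     stack = []
--     n = len(order)
--     cur = 1
--
--     for target in order:
--         while cur <= n and cur < target:
--             stack.append(cur)
--             cur += 1
--
--         if cur <= n and cur == target:
--             answer += 1
--             cur += 1
--             continue
--
--         if stack and stack[-1] == target:
--             stack.pop()
--             answer += 1
--         else:
--             break
--
--     return answer
-- ===== SOURCE B (Python) =====
-- def solution(order):
--     # Characterisation-based rewrite: no box stack and no `cur` counter.  A target t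
--     # succeeds iff 1 <= t <= n and either t exceeds M (the max successful target so
--     # far, i.e. it can still be loaded directly from the belt) or t is the largest
--     # value <= M not yet handled (the top of the implicit sub-belt).  Since every
--     # successful step loads exactly one box, the answer is the first failing index.
--     n = len(order)
--     seen = set()   # targets already handled
--     M = 0          # maximum successful target so far
--     for i, t in enumerate(order):
--         if t < 1 or t > n:
--             return i
--         if t <= M:
--             v = M
--             while v in seen:
--                 v -= 1
--             if v != t:
--                 return i
--         else:
--             M = t
--         seen.add(t)
--     return len(order)
-- ===== Notes on version B (the rewrite author's own statement) =====
-- stated objective: alternative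
-- what changed: Replaces A's explicit box stack and belt counter `cur` by a characterisation of when a target succeeds in terms of a seen-set and the prefix maximum M (t succeeds iff 1<=t<=n and t>M, or t is the largest value <=M not yet handled), and returns the first failing index instead of incrementing a counter per branch.
import Mathlib
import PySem

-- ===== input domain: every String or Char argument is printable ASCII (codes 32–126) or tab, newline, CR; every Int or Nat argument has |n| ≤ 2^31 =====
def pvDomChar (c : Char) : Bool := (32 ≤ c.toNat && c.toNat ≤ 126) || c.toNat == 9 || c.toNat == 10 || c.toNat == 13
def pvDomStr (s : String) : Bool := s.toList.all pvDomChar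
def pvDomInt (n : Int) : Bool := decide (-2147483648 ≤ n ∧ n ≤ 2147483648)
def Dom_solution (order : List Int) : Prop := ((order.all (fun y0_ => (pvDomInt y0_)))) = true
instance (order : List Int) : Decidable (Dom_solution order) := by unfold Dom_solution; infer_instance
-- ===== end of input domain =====

-- B replaces A's explicit box stack and belt counter by a seen-set / prefix-maximum
-- characterisation of when a target succeeds (objective: alternative; same result).

-- ===== PORT A =====
-- inner `while cur <= n and cur < target: stack.append(cur); cur += 1` (stack top = list head)
def pushW (n t : Int) (cur : Int) (stack : List Int) : Int × List Int :=
  if cur ≤ n ∧ cur < t then pushW n t (cur + 1) (cur :: stack) else (cur, stack)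
termination_by (t - cur).toNat
decreasing_by omega

-- `for target in order:` body of A
def loopA (n : Int) : List Int → Int → List Int → Int → Int
  | [], answer, _, _ => answer
  | t :: rest, answer, stack, cur =>
    let p := pushW n t cur stack
    if p.1 ≤ n ∧ p.1 = t then loopA n rest (answer + 1) p.2 (p.1 + 1)
    else
      match p.2 with
      | top :: s => if top = t then loopA n rest (answer + 1) s p.1 else answer
      | [] => answer

def solution (order : List Int) : Int :=
  loopA (order.length : Int) order 0 [] 1

-- ===== PORT B =====
-- termination measure facts for scanDown (the port cites countP_le_strict by name)
theorem countP_le_mono (l : List Int) (v : Int) :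
    l.countP (fun s => decide (s ≤ v - 1)) ≤ l.countP (fun s => decide (s ≤ v)) := by
  induction l with
  | nil => simp
  | cons a l ih =>
    simp only [List.countP_cons, decide_eq_true_eq]
    split_ifs <;> omega

theorem countP_le_strict {l : List Int} {v : Int} (hv : v ∈ l) :
    l.countP (fun s => decide (s ≤ v - 1)) < l.countP (fun s => decide (s ≤ v)) := by
  induction l with
  | nil => simp at hv
  | cons a l ih =>
    simp only [List.countP_cons, decide_eq_true_eq]
    rcases List.mem_cons.mp hv with h | h
    · rw [← h]
      have := countP_le_mono l v
      split_ifs <;> omega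
    · have := ih h
      split_ifs <;> omega

-- Source B's `while v in seen: v -= 1` (terminates: each step loses one seen element ≤ v)
def scanDown (seen : PySem.Set Int) (v : Int) : Int :=
  if h : PySem.Set.contains seen v then scanDown seen (v - 1) else v
termination_by seen.countP (fun s => decide (s ≤ v))
decreasing_by exact countP_le_strict ((PySem.Set.contains_iff _ _).mp h)

-- Source B's `for i, t in enumerate(order):` body
def loopB (n : Int) : List Int → Int → Int → PySem.Set Int → Int
  | [], _, _, _ => n
  | t :: rest, i, M, seen =>
    if t < 1 ∨ t > n then i
    else if t ≤ M then
      let v := scanDown seen M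
      if v ≠ t then i else loopB n rest (i + 1) M (PySem.Set.add seen t)
    else loopB n rest (i + 1) t (PySem.Set.add seen t)

def solution_alt (order : List Int) : Int :=
  loopB (order.length : Int) order 0 0 PySem.Set.empty

-- ===== PRECONDITION & SPEC =====
def Spec_solution (order : List Int) (out : Int) : Prop := out = solution_alt order
instance (order : List Int) (out : Int) : Decidable (Spec_solution order out) := by unfold Spec_solution; infer_instance

-- ===== CLAIM (what is proved, stated in full; the proofs are below) =====
def Claim_equal_solution : Prop := ∀ (order : List Int), Dom_solution order → Spec_solution order (solution order)

-- ===== LEMMAS AND PROOFS =====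

-- descending list of the values in [1, k] not in `seen` (A's stack, top = head)
def pendList (seen : PySem.Set Int) : Nat → List Int
  | 0 => []
  | k + 1 =>
    if PySem.Set.contains seen ((k : Int) + 1) then pendList seen k
    else ((k : Int) + 1) :: pendList seen k

-- the values A's inner while pushes on its way from cur to t: [t-1, t-2, …, cur]
def descInts (cur t : Int) : List Int :=
  if cur < t then descInts (cur + 1) t ++ [cur] else []
termination_by (t - cur).toNat
decreasing_by omega

theorem pendList_succ (seen : PySem.Set Int) (k : Nat) :
    pendList seen (k + 1) =
      if PySem.Set.contains seen ((k : Int) + 1) then pendList seen k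
      else ((k : Int) + 1) :: pendList seen k := rfl

theorem descInts_eq (cur t : Int) :
    descInts cur t = if cur < t then descInts (cur + 1) t ++ [cur] else [] := by
  rw [descInts]

theorem descInts_stop {cur t : Int} (h : ¬ cur < t) : descInts cur t = [] := by
  rw [descInts_eq, if_neg h]

theorem mem_pendList {seen : PySem.Set Int} : ∀ {k : Nat} {x : Int},
    x ∈ pendList seen k → 1 ≤ x ∧ x ≤ (k : Int) := by
  intro k
  induction k with
  | zero => intro x hx; simp [pendList] at hx
  | succ k ih =>
    intro x hx
    rw [pendList_succ] at hx
    split at hx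
    · have := ih hx; push_cast; omega
    · rcases List.mem_cons.mp hx with h | h
      · push_cast; omega
      · have := ih h; push_cast; omega

theorem scanDown_contains {seen : PySem.Set Int} {v : Int}
    (h : PySem.Set.contains seen v) : scanDown seen v = scanDown seen (v - 1) := by
  rw [scanDown, dif_pos h]

theorem scanDown_not_contains {seen : PySem.Set Int} {v : Int}
    (h : ¬ PySem.Set.contains seen v) : scanDown seen v = v := by
  rw [scanDown, dif_neg h]

-- scanDown from k is the head of the pending list (0 if it is empty)
theorem scanDown_eq_head {seen : PySem.Set Int}
    (hpos : ∀ s ∈ seen, 1 ≤ s) : ∀ (k : Nat),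
    scanDown seen (k : Int) = (pendList seen k).headD 0 := by
  intro k
  induction k with
  | zero =>
    have h0 : ¬ PySem.Set.contains seen 0 := by
      intro hc
      have := hpos 0 ((PySem.Set.contains_iff _ _).mp hc)
      omega
    simp [pendList, scanDown_not_contains h0]
  | succ k ih =>
    have hcast : ((k + 1 : Nat) : Int) = (k : Int) + 1 := by push_cast; ring
    rw [pendList_succ]
    by_cases hc : PySem.Set.contains seen ((k : Int) + 1)
    · rw [hcast, scanDown_contains hc, if_pos hc]
      simpa using ih
    · rw [hcast, scanDown_not_contains hc, if_neg hc]
      simp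

theorem contains_add_eq {seen : PySem.Set Int} {t x : Int} (hne : x ≠ t) :
    PySem.Set.contains (PySem.Set.add seen t) x = PySem.Set.contains seen x := by
  by_cases h : x ∈ seen
  · have h2 : x ∈ PySem.Set.add seen t := (PySem.Set.mem_add _ _ _).mpr (Or.inl h)
    rw [(PySem.Set.contains_iff _ _).mpr h, (PySem.Set.contains_iff _ _).mpr h2]
  · have h2 : ¬ x ∈ PySem.Set.add seen t := by
      rw [PySem.Set.mem_add]
      rintro (h1 | h1)
      · exact h h1
      · exact hne h1
    have e1 : PySem.Set.contains (PySem.Set.add seen t) x = false := by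
      by_contra hx
      exact h2 ((PySem.Set.contains_iff _ _).mp (by revert hx; cases PySem.Set.contains (PySem.Set.add seen t) x <;> simp))
    have e2 : PySem.Set.contains seen x = false := by
      by_contra hx
      exact h ((PySem.Set.contains_iff _ _).mp (by revert hx; cases PySem.Set.contains seen x <;> simp))
    rw [e1, e2]

-- adding a value above k leaves the pending list unchanged
theorem pendList_add_above {seen : PySem.Set Int} {t : Int} : ∀ {k : Nat},
    (k : Int) < t → pendList (PySem.Set.add seen t) k = pendList seen k := by
  intro k
  induction k with
  | zero => intro _; simp [pendList]
  | succ k ih =>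
    intro hk
    have hk' : (k : Int) < t := by push_cast at hk ⊢; omega
    have hne : (k : Int) + 1 ≠ t := by push_cast at hk; omega
    rw [pendList_succ, pendList_succ, contains_add_eq hne, ih hk']

-- popping the head of the pending list = adding it to seen
theorem pendList_add_head {seen : PySem.Set Int} : ∀ {k : Nat} {t : Int} {rest : List Int},
    pendList seen k = t :: rest → pendList (PySem.Set.add seen t) k = rest := by
  intro k
  induction k with
  | zero => intro t rest h; simp [pendList] at h
  | succ k ih =>
    intro t rest h
    rw [pendList_succ] at h
    split at h
    · next hc =>
      have hcc : PySem.Set.contains (PySem.Set.add seen t) ((k : Int) + 1) := by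
        refine (PySem.Set.contains_iff _ _).mpr ?_
        exact (PySem.Set.mem_add _ _ _).mpr (Or.inl ((PySem.Set.contains_iff _ _).mp hc))
      rw [pendList_succ, if_pos hcc]
      exact ih h
    · next hc =>
      have ht1 : t = (k : Int) + 1 := (List.cons.inj h).1.symm
      have ht2 : rest = pendList seen k := (List.cons.inj h).2.symm
      have hcc : PySem.Set.contains (PySem.Set.add seen t) ((k : Int) + 1) := by
        refine (PySem.Set.contains_iff _ _).mpr ?_
        exact (PySem.Set.mem_add _ _ _).mpr (Or.inr ht1.symm)
      rw [pendList_succ, if_pos hcc, ht2, pendList_add_above (by omega)]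

-- peel the TOP element of descInts
theorem descInts_cons : ∀ (fuel : Nat) (cur t : Int), (t - cur).toNat = fuel → cur < t →
    descInts cur t = (t - 1) :: descInts cur (t - 1) := by
  intro fuel
  induction fuel with
  | zero => intro cur t hf hlt; omega
  | succ f ih =>
    intro cur t hf hlt
    rw [descInts_eq cur t, if_pos hlt]
    by_cases h2 : cur + 1 < t
    · rw [ih (cur + 1) t (by omega) h2, descInts_eq cur (t - 1), if_pos (by omega)]
      simp
    · have hct : cur + 1 = t := by omega
      rw [descInts_eq (cur + 1) t, if_neg (by omega), descInts_stop (show ¬ cur < t - 1 by omega)]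
      simp
      omega

-- pushW when cur ≤ t ≤ n: pushes cur..t-1 and stops exactly at t
theorem pushW_run {n : Int} : ∀ (fuel : Nat) (t cur : Int) (stack : List Int),
    (t - cur).toNat = fuel → cur ≤ t → t ≤ n →
    pushW n t cur stack = (t, descInts cur t ++ stack) := by
  intro fuel
  induction fuel with
  | zero =>
    intro t cur stack hf hle hn
    have hct : cur = t := by omega
    rw [pushW, if_neg (by omega), descInts_stop (by omega)]
    simp [hct]
  | succ f ih =>
    intro t cur stack hf hle hn
    have hlt : cur < t := by omega
    rw [pushW, if_pos ⟨by omega, hlt⟩, ih t (cur + 1) (cur :: stack) (by omega) (by omega) hn,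
      descInts_eq cur t, if_pos hlt]
    simp

theorem pushW_stop {n t cur : Int} {stack : List Int} (h : ¬ (cur ≤ n ∧ cur < t)) :
    pushW n t cur stack = (cur, stack) := by
  rw [pushW, if_neg h]

-- pushW general bounds (used on the break paths)
theorem pushW_inv {n t : Int} : ∀ (fuel : Nat) (cur : Int) (stack : List Int),
    (t - cur).toNat = fuel →
    cur ≤ (pushW n t cur stack).1 ∧
    ¬((pushW n t cur stack).1 ≤ n ∧ (pushW n t cur stack).1 < t) ∧
    (pushW n t cur stack).1 ≤ max cur t ∧
    (∀ x ∈ (pushW n t cur stack).2, x ∈ stack ∨ (cur ≤ x ∧ x < (pushW n t cur stack).1)) := by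
  intro fuel
  induction fuel with
  | zero =>
    intro cur stack hf
    have hng : ¬ (cur ≤ n ∧ cur < t) := by omega
    rw [pushW_stop hng]
    exact ⟨le_refl _, hng, by simp, fun x hx => Or.inl hx⟩
  | succ f ih =>
    intro cur stack hf
    by_cases hg : cur ≤ n ∧ cur < t
    · rw [pushW, if_pos hg]
      obtain ⟨h1, h2, h3, h4⟩ := ih (cur + 1) (cur :: stack) (by omega)
      refine ⟨by omega, h2, by simp at h3 ⊢; omega, ?_⟩
      intro x hx
      rcases h4 x hx with h | h
      · rcases List.mem_cons.mp h with h | h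
        · right; omega
        · exact Or.inl h
      · right; omega
    · rw [pushW_stop hg]
      exact ⟨le_refl _, hg, by simp, fun x hx => Or.inl hx⟩

-- a seen-free region above M contributes a descending run to the pending list
theorem pendList_free {seen : PySem.Set Int} {M : Int} (hM : 0 ≤ M) :
    ∀ (k : Nat), M ≤ (k : Int) → (∀ j : Int, M < j → j ≤ (k : Int) → ¬ j ∈ seen) →
    pendList seen k = descInts (M + 1) ((k : Int) + 1) ++ pendList seen M.toNat := by
  intro k
  induction k with
  | zero =>
    intro hk _
    have hM0 : M = 0 := by omega
    rw [hM0, descInts_stop (show ¬ (0 : Int) + 1 < ((0 : Nat) : Int) + 1 by omega)]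
    simp [pendList]
  | succ k ih =>
    intro hk hfree
    have hcast : ((k + 1 : Nat) : Int) = (k : Int) + 1 := by push_cast; ring
    by_cases hMk : M ≤ (k : Int)
    · have hnc : ¬ PySem.Set.contains seen ((k : Int) + 1) := by
        intro hc
        exact hfree ((k : Int) + 1) (by omega) (by omega) ((PySem.Set.contains_iff _ _).mp hc)
      rw [pendList_succ, if_neg hnc,
        ih hMk (fun j h1 h2 => hfree j h1 (by omega)), hcast,
        descInts_cons (((k : Int) + 1 + 1) - (M + 1)).toNat (M + 1) ((k : Int) + 1 + 1) rfl (by omega)]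
      simp
    · have hMe : M = (k : Int) + 1 := by push_cast at hk; omega
      have hMt : M.toNat = k + 1 := by omega
      rw [hcast, descInts_stop (show ¬ M + 1 < (k : Int) + 1 + 1 by omega), hMt]
      simp

-- direct load: pushing M+1..t-1 and marking t seen, seen ⊆ [1, M]
theorem pend_glue {seen : PySem.Set Int} {M t : Int} (hM : 0 ≤ M) (ht : M < t)
    (hseen : ∀ s ∈ seen, 1 ≤ s ∧ s ≤ M) :
    pendList (PySem.Set.add seen t) t.toNat =
      descInts (M + 1) t ++ pendList seen M.toNat := by
  have htn : t.toNat = (t - 1).toNat + 1 := by omega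
  have hcast : (((t - 1).toNat : Nat) : Int) = t - 1 := by omega
  have hct : PySem.Set.contains (PySem.Set.add seen t) ((((t - 1).toNat : Nat) : Int) + 1) := by
    refine (PySem.Set.contains_iff _ _).mpr ?_
    refine (PySem.Set.mem_add _ _ _).mpr (Or.inr ?_)
    omega
  rw [htn, pendList_succ, if_pos hct]
  have hfree : ∀ j : Int, M < j → j ≤ (((t - 1).toNat : Nat) : Int) → ¬ j ∈ PySem.Set.add seen t := by
    intro j h1 h2
    rw [PySem.Set.mem_add]
    rintro (h | h)
    · have := hseen j h; omega
    · omega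
  rw [pendList_free hM (t - 1).toNat (by omega) hfree, hcast]
  have hMM : (M.toNat : Int) < t := by omega
  rw [pendList_add_above hMM]
  have : t - 1 + 1 = t := by ring
  rw [this]

-- one-step unfolding of the two loops
theorem loopA_cons (n t : Int) (rest : List Int) (answer : Int) (stack : List Int) (cur : Int) :
    loopA n (t :: rest) answer stack cur =
      (if (pushW n t cur stack).1 ≤ n ∧ (pushW n t cur stack).1 = t then
        loopA n rest (answer + 1) (pushW n t cur stack).2 ((pushW n t cur stack).1 + 1)
      else
        match (pushW n t cur stack).2 with
        | top :: s => if top = t then loopA n rest (answer + 1) s (pushW n t cur stack).1 else answer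
        | [] => answer) := rfl

theorem loopB_cons (n t : Int) (rest : List Int) (i M : Int) (seen : PySem.Set Int) :
    loopB n (t :: rest) i M seen =
      (if t < 1 ∨ t > n then i
      else if t ≤ M then
        (if scanDown seen M ≠ t then i else loopB n rest (i + 1) M (PySem.Set.add seen t))
      else loopB n rest (i + 1) t (PySem.Set.add seen t)) := rfl

-- main simulation: A's (stack, cur, answer) state vs B's (M, seen, i) state
theorem loopA_eq_loopB (n : Int) : ∀ (rest : List Int) (i M : Int) (seen : PySem.Set Int),
    (∀ s ∈ seen, 1 ≤ s ∧ s ≤ M) → 0 ≤ M → M ≤ n → i + (rest.length : Int) = n →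
    loopA n rest i (pendList seen M.toNat) (M + 1) = loopB n rest i M seen := by
  intro rest
  induction rest with
  | nil =>
    intro i M seen _ _ _ hi
    simp only [loopA, loopB]
    simp at hi
    omega
  | cons t rest ih =>
    intro i M seen hseen hM0 hMn hi
    have hMcast : ((M.toNat : Nat) : Int) = M := by omega
    have hlen : i + 1 + (rest.length : Int) = n := by
      simp at hi; omega
    rw [loopA_cons, loopB_cons]
    by_cases hbad : t < 1 ∨ t > n
    · rw [if_pos hbad]
      rcases hbad with hlo | hhi
      · -- t < 1 ≤ M+1: no pushes, no direct load, stack head (if any) ≥ 1 > t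
        rw [pushW_stop (show ¬ ((M + 1 : Int) ≤ n ∧ M + 1 < t) by omega)]
        dsimp only
        rw [if_neg (show ¬ ((M + 1 : Int) ≤ n ∧ M + 1 = t) by omega)]
        rcases hsl : pendList seen M.toNat with - | ⟨top, s⟩
        · rfl
        · have htop : 1 ≤ top := (mem_pendList (by rw [hsl]; exact List.mem_cons_self ..)).1
          dsimp only
          rw [if_neg (by omega)]
      · -- t > n: push exits above n, every stack value < t
        obtain ⟨h1, h2, h3, h4⟩ :=
          pushW_inv (n := n) (t := t) (t - (M + 1)).toNat (M + 1) (pendList seen M.toNat) rfl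
        have hp1 : ¬ ((pushW n t (M + 1) (pendList seen M.toNat)).1 ≤ n ∧
            (pushW n t (M + 1) (pendList seen M.toNat)).1 = t) := by
          rintro ⟨ha, hb⟩; omega
        rw [if_neg hp1]
        rcases hsl : (pushW n t (M + 1) (pendList seen M.toNat)).2 with - | ⟨top, s⟩
        · rfl
        · have htop : top < t := by
            have hmem : top ∈ (pushW n t (M + 1) (pendList seen M.toNat)).2 := by
              rw [hsl]; exact List.mem_cons_self ..
            rcases h4 top hmem with h | h
            · have := mem_pendList h; omega
            · have hmax : (pushW n t (M + 1) (pendList seen M.toNat)).1 ≤ max (M + 1) t := h3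
              have hMt : M + 1 ≤ t := by omega
              rw [max_eq_right hMt] at hmax
              omega
          dsimp only
          rw [if_neg (by omega)]
    · rw [if_neg hbad]
      have ht1 : 1 ≤ t := by omega
      have htn : t ≤ n := by omega
      by_cases htM : t ≤ M
      · -- pop case: no pushes (cur = M+1 > t), compare against the stack top
        rw [if_pos htM, pushW_stop (show ¬ ((M + 1 : Int) ≤ n ∧ M + 1 < t) by omega)]
        dsimp only
        rw [if_neg (show ¬ ((M + 1 : Int) ≤ n ∧ M + 1 = t) by omega)]
        have hpos : ∀ s ∈ seen, 1 ≤ s := fun s hs => (hseen s hs).1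
        have hscan : scanDown seen M = (pendList seen M.toNat).headD 0 := by
          have := scanDown_eq_head hpos M.toNat
          rwa [hMcast] at this
        rcases hsl : pendList seen M.toNat with - | ⟨top, s⟩
        · rw [hsl] at hscan
          simp at hscan
          rw [if_pos (show scanDown seen M ≠ t by omega)]
        · rw [hsl] at hscan
          simp at hscan
          by_cases htop : top = t
          · dsimp only
            rw [if_pos htop, if_neg (show ¬ scanDown seen M ≠ t by omega)]
            have hs' : s = pendList (PySem.Set.add seen t) M.toNat :=
              (pendList_add_head (by rw [hsl, htop])).symm
            rw [hs']
            exact ih (i + 1) M (PySem.Set.add seen t)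
              (by intro x hx
                  rcases (PySem.Set.mem_add _ _ _).mp hx with h | h
                  · exact hseen x h
                  · omega)
              hM0 hMn hlen
          · dsimp only
            rw [if_neg htop, if_pos (show scanDown seen M ≠ t by omega)]
      · -- direct-load case: pushes M+1..t-1, then cur = t = target
        rw [if_neg htM,
          pushW_run (t - (M + 1)).toNat t (M + 1) (pendList seen M.toNat) rfl (by omega) htn]
        dsimp only
        rw [if_pos (show t ≤ n ∧ t = t from ⟨htn, rfl⟩)]
        have hglue := pend_glue (t := t) hM0 (by omega) hseen
        rw [← hglue]
        exact ih (i + 1) t (PySem.Set.add seen t)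
          (by intro x hx
              rcases (PySem.Set.mem_add _ _ _).mp hx with h | h
              · have := hseen x h; omega
              · omega)
          (by omega) htn hlen

-- ===== VERDICT (by name: the statement is the Claim_ definition above) =====
theorem solution_spec : Claim_equal_solution := by
  intro order _
  show solution order = solution_alt order
  unfold solution solution_alt
  have h0 : ∀ s ∈ (PySem.Set.empty : PySem.Set Int), 1 ≤ s ∧ s ≤ 0 := by
    intro s hs; simp [PySem.Set.empty] at hs
  have h := loopA_eq_loopB (order.length : Int) order 0 0 PySem.Set.empty h0 (le_refl 0)
    (by positivity) (by simp)
  simpa [pendList] using h
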